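-- pv_equiv track=rewrite | github.com/MaxKret/SchoolProjects | CS303E/Exam2C.py | laggingLowercase
-- ===== SOURCE A (Python) =====
-- def laggingLowercase(string):
--     # replace pass with your solution to problem 7 here
--     if len(string) < 1:
--         return string
--     if len(string) == 1:
--         if(string.isalpha() and string.islower()):
--             newCharNum = ord(string) - 1
--             if(newCharNum < 97):
--                 newCharNum = 122
--             if(newCharNum > 122):
--                 newCharNum = 97
--             newChar = chr(newCharNum)
--             return newChar
--         else:
--             return string
--     else:
--         if(string[0].isalpha() and string[0].islower()):
--             newCharNum = ord(string[0]) - 1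
--             if(newCharNum < 97):
--                 newCharNum = 122
--             if(newCharNum > 122):
--                 newCharNum = 97
--             newChar = chr(newCharNum)
--             return newChar + laggingLowercase(string[1:])
--         else:
--             return string[0] + laggingLowercase(string[1:])
-- ===== SOURCE B (Python) =====
-- def laggingLowercase(string):
--     out = []
--     for c in string:
--         if c.isalpha() and c.islower():
--             out.append('z' if c == 'a' else chr(ord(c) - 1))
--         else:
--             out.append(c)
--     return ''.join(out)
-- ===== Notes on version B (the rewrite author's own statement) =====
-- stated objective: faster
-- what changed: Replaced the O(n^2) recursion over string slices with a single iterative pass that appends each (possibly shifted) character to a list and joins it once.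
import Mathlib
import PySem

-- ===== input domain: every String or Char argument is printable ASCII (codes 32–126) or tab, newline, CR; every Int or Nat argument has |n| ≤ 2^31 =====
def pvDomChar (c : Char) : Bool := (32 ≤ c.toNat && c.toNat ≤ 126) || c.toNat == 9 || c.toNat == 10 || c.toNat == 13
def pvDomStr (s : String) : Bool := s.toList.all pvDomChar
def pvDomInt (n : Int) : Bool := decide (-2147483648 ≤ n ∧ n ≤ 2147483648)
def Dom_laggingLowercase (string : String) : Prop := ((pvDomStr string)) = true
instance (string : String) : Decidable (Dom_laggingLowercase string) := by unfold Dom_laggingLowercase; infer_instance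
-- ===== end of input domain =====

-- B replaces A's O(n^2) slice recursion with a single iterative pass that joins once at the end.

-- ===== PORT A =====
-- A's per-character shift: ord - 1, then the two range fix-ups, exactly as in the Python
def pvShiftA (c : Char) : Char :=
  let n0 : Int := (c.toNat : Int) - 1
  let n1 : Int := if n0 < 97 then 122 else n0
  let n2 : Int := if n1 > 122 then 97 else n1
  Char.ofNat n2.toNat

-- A's recursion on the string, case-split on length exactly as the Python does
def pvLagA : List Char → List Char
  | [] => []
  | [c] =>
      if PySem.Chars.isalpha c && PySem.Chars.islower c then [pvShiftA c] else [c]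
  | c :: c' :: rest =>
      if PySem.Chars.isalpha c && PySem.Chars.islower c then
        pvShiftA c :: pvLagA (c' :: rest)
      else
        c :: pvLagA (c' :: rest)

def laggingLowercase (string : String) : String := String.ofList (pvLagA string.toList)

-- ===== PORT B =====
-- Source B's loop body: the character appended for c
def pvStepB (c : Char) : Char :=
  if PySem.Chars.isalpha c && PySem.Chars.islower c then
    (if c = 'a' then 'z' else Char.ofNat (c.toNat - 1))
  else c

-- Source B: accumulate the output list left to right, join once at the end
def laggingLowercase_alt (string : String) : String :=
  String.ofList (string.toList.foldl (fun out c => out ++ [pvStepB c]) [])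

-- ===== PRECONDITION & SPEC =====
def Spec_laggingLowercase (string : String) (out : String) : Prop := out = laggingLowercase_alt string
instance (string : String) (out : String) : Decidable (Spec_laggingLowercase string out) := by unfold Spec_laggingLowercase; infer_instance

-- ===== CLAIM (what is proved, stated in full; the proofs are below) =====
def Claim_equal_laggingLowercase : Prop := ∀ (string : String), Dom_laggingLowercase string → Spec_laggingLowercase string (laggingLowercase string)

-- ===== LEMMAS AND PROOFS =====

theorem pvFoldB_eq_map (l acc : List Char) :
    l.foldl (fun out c => out ++ [pvStepB c]) acc = acc ++ l.map pvStepB := by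
  induction l generalizing acc with
  | nil => simp
  | cons c t ih => simp [List.foldl, ih]

theorem pvShiftA_eq_stepB (c : Char)
    (h : (PySem.Chars.isalpha c && PySem.Chars.islower c) = true) :
    pvShiftA c = (if c = 'a' then 'z' else Char.ofNat (c.toNat - 1)) := by
  have hl : PySem.Chars.islower c = true := by
    cases hb : PySem.Chars.islower c <;> simp [hb] at h ⊢
  have hlo : 97 ≤ c.toNat := by
    simp [PySem.Chars.islower, Char.le_def] at hl; exact_mod_cast hl.1
  have hhi : c.toNat ≤ 122 := by
    simp [PySem.Chars.islower, Char.le_def] at hl; exact_mod_cast hl.2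
  by_cases ha : c = 'a'
  · subst ha; decide
  · have h97 : c.toNat ≠ 97 := by
      intro he; apply ha
      have hx := Char.ofNat_toNat c
      rw [he] at hx; exact hx.symm
    have h98 : 98 ≤ c.toNat := by omega
    simp only [pvShiftA, ha, if_false]
    have hn0 : ¬ ((c.toNat : Int) - 1 < 97) := by omega
    have hn1 : ¬ ((c.toNat : Int) - 1 > 122) := by omega
    simp only [hn0, if_false, hn1]
    congr 1
    omega

theorem pvLagA_eq_map : ∀ l : List Char, pvLagA l = l.map pvStepB
  | [] => rfl
  | [c] => by
      by_cases h : (PySem.Chars.isalpha c && PySem.Chars.islower c) = true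
      · simp [pvLagA, pvStepB, h, pvShiftA_eq_stepB c h]
      · simp [pvLagA, pvStepB, h]
  | c :: c' :: rest => by
      have ih := pvLagA_eq_map (c' :: rest)
      by_cases h : (PySem.Chars.isalpha c && PySem.Chars.islower c) = true
      · simp [pvLagA, pvStepB, h, pvShiftA_eq_stepB c h, ih]
      · simp [pvLagA, pvStepB, h, ih]

-- ===== VERDICT (by name: the statement is the Claim_ definition above) =====
theorem laggingLowercase_spec : Claim_equal_laggingLowercase := by
  intro s _
  unfold Spec_laggingLowercase laggingLowercase laggingLowercase_alt
  rw [pvFoldB_eq_map, List.nil_append, pvLagA_eq_map]
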